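-- pv_equiv track=rewrite | github.com/shubham11941140/Leetcode-Solutions | 2359-find-closest-node-to-given-two-nodes/2359-find-closest-node-to-given-two-nodes.py | process
-- ===== SOURCE A (Python) =====
-- def process(a, b):
--     v = set()
--     for i in a:
--         if i in b:
--             m = max(a[i], b[i])
--             v.add(m)
--     if not v:
--         return -1
--     mv = min(v)
--     ans = []
--     for i in a:
--         if i in b:
--             m = max(a[i], b[i])
--             if m == mv:
--                 ans.append(i)
--     return min(ans)
-- ===== SOURCE B (Python) =====
-- def process(a, b):
--     best = None  # (value, key) of the current best candidate
--     for i in a: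
--         if i in b:
--             m = max(a[i], b[i])
--             if best is None or m < best[0]:
--                 best = (m, i)
--             elif m == best[0] and i < best[1]:
--                 best = (m, i)
--     return -1 if best is None else best[1]
-- ===== Notes on version B (the rewrite author's own statement) =====
-- stated objective: simpler
-- what changed: Replaces A's build-a-set-of-max-values, take its minimum, then rescan all keys collecting the argmin list, with a single pass over the keys maintaining one running (best value, smallest key) pair.
import Mathlib
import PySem

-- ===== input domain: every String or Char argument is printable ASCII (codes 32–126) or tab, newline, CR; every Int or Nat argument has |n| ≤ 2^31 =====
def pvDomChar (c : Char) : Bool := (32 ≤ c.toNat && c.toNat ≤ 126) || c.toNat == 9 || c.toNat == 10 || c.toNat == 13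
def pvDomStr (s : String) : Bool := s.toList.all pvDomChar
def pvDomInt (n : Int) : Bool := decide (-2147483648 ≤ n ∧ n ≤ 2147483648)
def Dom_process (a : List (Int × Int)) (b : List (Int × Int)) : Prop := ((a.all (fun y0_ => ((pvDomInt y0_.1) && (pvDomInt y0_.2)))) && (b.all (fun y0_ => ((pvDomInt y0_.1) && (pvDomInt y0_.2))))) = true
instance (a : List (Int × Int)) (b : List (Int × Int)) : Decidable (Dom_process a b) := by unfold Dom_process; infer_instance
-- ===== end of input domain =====

-- B replaces A's two passes (set of max-values + rescan for the argmin) by one pass keeping a running (best value, smallest key) pair; return values only, no mutation.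

-- ===== PORT A =====
-- a[i]/b[i] with i a key known present is ported as getD (the default is never used).
def process (a : List (Int × Int)) (b : List (Int × Int)) : Int :=
  let da := PySem.Dict.ofList a
  let db := PySem.Dict.ofList b
  let v : PySem.Set Int :=
    da.keys.foldl (fun v i =>
      if db.contains i then PySem.Set.add v (max (da.getD i 0) (db.getD i 0)) else v)
      PySem.Set.empty
  if v = [] then -1
  else
    match PySem.List.min? v (fun x => x) with
    | none => -1  -- unreachable: v ≠ []
    | some mv =>
      let ans : List Int :=
        da.keys.foldl (fun ans i =>
          if db.contains i then
            (if max (da.getD i 0) (db.getD i 0) = mv then ans ++ [i] else ans)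
          else ans) []
      match PySem.List.min? ans (fun x => x) with
      | none => -1  -- unreachable: ans ≠ []
      | some r => r

-- ===== PORT B =====
def process_alt (a : List (Int × Int)) (b : List (Int × Int)) : Int :=
  let da := PySem.Dict.ofList a
  let db := PySem.Dict.ofList b
  let best : Option (Int × Int) :=
    da.keys.foldl (fun acc i =>
      if db.contains i then
        let m := max (da.getD i 0) (db.getD i 0)
        match acc with
        | none => some (m, i)
        | some (bv, bk) =>
          if m < bv then some (m, i)
          else if m = bv ∧ i < bk then some (m, i)
          else some (bv, bk)
      else acc) none
  match best with
  | none => -1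
  | some (_, k) => k

-- ===== PRECONDITION & SPEC =====
def Spec_process (a : List (Int × Int)) (b : List (Int × Int)) (out : Int) : Prop := out = process_alt a b
instance (a : List (Int × Int)) (b : List (Int × Int)) (out : Int) : Decidable (Spec_process a b out) := by unfold Spec_process; infer_instance

-- ===== CLAIM (what is proved, stated in full; the proofs are below) =====
def Claim_equal_process : Prop := ∀ (a : List (Int × Int)) (b : List (Int × Int)), Dom_process a b → Spec_process a b (process a b)

-- ===== LEMMAS AND PROOFS =====

-- A's first loop builds set-update of the max-values of the common keys.
theorem foldA_set (p : Int → Bool) (m : Int → Int) :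
    ∀ (ks : List Int) (s0 : PySem.Set Int),
      ks.foldl (fun s i => if p i then PySem.Set.add s (m i) else s) s0
        = PySem.Set.update s0 ((ks.filter p).map m) := by
  intro ks
  induction ks with
  | nil => intro s0; simp [PySem.Set.update]
  | cons i t ih =>
    intro s0
    by_cases h : p i
    · simp [h, ih, PySem.Set.update_cons]
    · simp [h, ih]

-- A's second loop appends exactly the common keys whose max-value equals mv.
theorem foldA_ans (p : Int → Bool) (m : Int → Int) (mv : Int) :
    ∀ (ks : List Int) (acc : List Int),
      ks.foldl (fun ans i => if p i then (if m i = mv then ans ++ [i] else ans) else ans) acc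
        = acc ++ ((ks.filter p).filter (fun i => m i = mv)) := by
  intro ks
  induction ks with
  | nil => intro acc; simp
  | cons i t ih =>
    intro acc
    by_cases h : p i
    · by_cases h2 : m i = mv <;> simp [h, h2, ih]
    · simp [h, ih]

-- min? with the identity key only depends on the members of the list.
theorem min?_congr_mem (l₁ l₂ : List Int) (h : ∀ x : Int, x ∈ l₁ ↔ x ∈ l₂) :
    PySem.List.min? l₁ (fun x => x) = PySem.List.min? l₂ (fun x => x) := by
  cases hl₁ : PySem.List.min? l₁ (fun x => x) with
  | none =>
    rw [PySem.List.min?_eq_none_iff] at hl₁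
    cases hl₂ : PySem.List.min? l₂ (fun x => x) with
    | none => rfl
    | some y =>
      have := PySem.List.min?_mem hl₂
      rw [← h] at this
      simp [hl₁] at this
  | some x =>
    cases hl₂ : PySem.List.min? l₂ (fun x => x) with
    | none =>
      rw [PySem.List.min?_eq_none_iff] at hl₂
      have := PySem.List.min?_mem hl₁
      rw [h] at this
      simp [hl₂] at this
    | some y =>
      have hx := PySem.List.min?_mem hl₁
      have hy := PySem.List.min?_mem hl₂
      have h₁ := PySem.List.min?_isMin hl₁ y ((h y).mpr hy)
      have h₂ := PySem.List.min?_isMin hl₂ x ((h x).mp hx)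
      simp only at h₁ h₂
      exact congrArg some (le_antisymm h₁ h₂)

theorem min?_append_singleton (l : List Int) (x : Int) :
    PySem.List.min? (l ++ [x]) (fun y => y)
      = some (match PySem.List.min? l (fun y => y) with | none => x | some v => min v x) := by
  cases l with
  | nil => simp [PySem.List.min?]
  | cons h t =>
    rw [List.cons_append, PySem.List.min?_id_cons, PySem.List.min?_id_cons]
    simp [List.foldl_append]

-- B's guarded fold equals the unguarded fold over the filtered keys.
theorem foldB_filter (p : Int → Bool) (m : Int → Int) :
    ∀ (ks : List Int) (acc : Option (Int × Int)),
      ks.foldl (fun acc i =>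
        if p i then
          match acc with
          | none => some (m i, i)
          | some (bv, bk) =>
            if m i < bv then some (m i, i)
            else if m i = bv ∧ i < bk then some (m i, i)
            else some (bv, bk)
        else acc) acc
      = (ks.filter p).foldl (fun acc i =>
          match acc with
          | none => some (m i, i)
          | some (bv, bk) =>
            if m i < bv then some (m i, i)
            else if m i = bv ∧ i < bk then some (m i, i)
            else some (bv, bk)) acc := by
  intro ks
  induction ks with
  | nil => intro acc; simp
  | cons i t ih =>
    intro acc
    by_cases h : p i <;> simp [h, ih]

-- Characterisation of B's unguarded fold over the common keys.
theorem foldB_char (m : Int → Int) :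
    ∀ (S : List Int), S ≠ [] →
      ∃ mv kmin,
        PySem.List.min? (S.map m) (fun x => x) = some mv ∧
        PySem.List.min? (S.filter (fun i => m i = mv)) (fun x => x) = some kmin ∧
        S.foldl (fun acc i =>
          match acc with
          | none => some (m i, i)
          | some (bv, bk) =>
            if m i < bv then some (m i, i)
            else if m i = bv ∧ i < bk then some (m i, i)
            else some (bv, bk)) none = some (mv, kmin) := by
  intro S
  induction S using List.reverseRecOn with
  | nil => intro h; exact absurd rfl h
  | append_singleton l x ih =>
    intro _
    by_cases hl : l = []
    · subst hl
      refine ⟨m x, x, ?_, ?_, ?_⟩ <;> simp [PySem.List.min?]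
    · obtain ⟨mv, kmin, hmv, hk, hfold⟩ := ih hl
      have hmvmin : ∀ y ∈ l.map m, mv ≤ y := by
        intro y hy
        have := PySem.List.min?_isMin hmv y hy
        simpa using this
      have hkmem : kmin ∈ l.filter (fun i => m i = mv) := PySem.List.min?_mem hk
      have hkmin : ∀ y ∈ l.filter (fun i => m i = mv), kmin ≤ y := by
        intro y hy
        have := PySem.List.min?_isMin hk y hy
        simpa using this
      rw [List.foldl_append, hfold]
      simp only [List.foldl_cons, List.foldl_nil]
      simp only [List.map_append, List.map_cons, List.map_nil]
      by_cases h1 : m x < mv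
      · refine ⟨m x, x, ?_, ?_, ?_⟩
        · rw [min?_append_singleton, hmv]
          simp [min_eq_right (le_of_lt h1)]
        · have hnil : l.filter (fun i => m i = m x) = [] := by
            rw [List.filter_eq_nil_iff]
            intro i hi
            have := hmvmin (m i) (List.mem_map_of_mem hi)
            simp only [decide_eq_true_eq]
            omega
          rw [List.filter_append, hnil]
          simp [PySem.List.min?]
        · simp [h1]
      · by_cases h2 : m x = mv
        · have hfil : (l ++ [x]).filter (fun i => m i = mv) = l.filter (fun i => m i = mv) ++ [x] := by
            rw [List.filter_append]
            simp [h2]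
          by_cases h3 : x < kmin
          · refine ⟨mv, x, ?_, ?_, ?_⟩
            · rw [min?_append_singleton, hmv]
              simp [h2]
            · rw [hfil, min?_append_singleton, hk]
              simp [min_eq_right (le_of_lt h3)]
            · simp [h2, h3]
          · refine ⟨mv, kmin, ?_, ?_, ?_⟩
            · rw [min?_append_singleton, hmv]
              simp [h2]
            · rw [hfil, min?_append_singleton, hk]
              have : min kmin x = kmin := min_eq_left (by omega)
              simp [this]
            · simp [h2, h3]
        · have hge : mv ≤ m x := by omega
          refine ⟨mv, kmin, ?_, ?_, ?_⟩
          · rw [min?_append_singleton, hmv]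
            simp [min_eq_left hge]
          · rw [List.filter_append]
            simp [h2, hk]
          · simp [h1, h2]

-- Set.ofList is empty iff the underlying list is.
theorem ofList_eq_nil_iff (l : List Int) : PySem.Set.ofList l = [] ↔ l = [] := by
  cases l with
  | nil => simp [PySem.Set.ofList_nil]
  | cons x t => simp [PySem.Set.ofList_cons]

-- ===== VERDICT (by name: the statement is the Claim_ definition above) =====
-- The common core: both ports over an arbitrary key list ks, membership test p and value map m.
theorem main_abstract (ks : List Int) (p : Int → Bool) (m : Int → Int) :
    (let v := ks.foldl (fun v i => if p i then PySem.Set.add v (m i) else v) PySem.Set.empty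
     if v = [] then (-1 : Int)
     else
       match PySem.List.min? v (fun x => x) with
       | none => -1
       | some mv =>
         match PySem.List.min? (ks.foldl (fun ans i => if p i then (if m i = mv then ans ++ [i] else ans) else ans) []) (fun x => x) with
         | none => -1
         | some r => r)
    =
    (match ks.foldl (fun acc i =>
        if p i then
          match acc with
          | none => some (m i, i)
          | some (bv, bk) =>
            if m i < bv then some (m i, i)
            else if m i = bv ∧ i < bk then some (m i, i)
            else some (bv, bk)
        else acc) none with
     | none => -1
     | some (_, k) => k) := by
  rw [foldB_filter p m]
  simp only [foldA_set p m, PySem.Set.update_empty]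
  by_cases hS : ks.filter p = []
  · simp [hS, PySem.Set.ofList_nil]
  · obtain ⟨mv, kmin, hmv, hk, hfold⟩ := foldB_char m (ks.filter p) hS
    rw [hfold]
    have hvne : PySem.Set.ofList ((ks.filter p).map m) ≠ [] := by
      rw [Ne, ofList_eq_nil_iff, List.map_eq_nil_iff]
      exact hS
    rw [if_neg hvne]
    have hminv : PySem.List.min? (PySem.Set.ofList ((ks.filter p).map m)) (fun x => x)
        = some mv := by
      rw [min?_congr_mem _ ((ks.filter p).map m) (fun x => PySem.Set.mem_ofList ((ks.filter p).map m) x), hmv]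
    rw [hminv]
    simp only [foldA_ans p m, List.nil_append, hk]

-- ===== VERDICT (by name: the statement is the Claim_ definition above) =====
theorem process_spec : Claim_equal_process := by
  intro a b _
  show process a b = process_alt a b
  exact main_abstract (PySem.Dict.ofList a).keys
    (fun i => (PySem.Dict.ofList b).contains i)
    (fun i => max ((PySem.Dict.ofList a).getD i 0) ((PySem.Dict.ofList b).getD i 0))
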